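-- pv_equiv track=rewrite | github.com/WolverineAryan/Attendance-Prediction | backend/ai_chat.py | search_relevant_rows
-- ===== SOURCE A (Python) =====
-- def search_relevant_rows(prompt, csv_text):
--     lines = csv_text.split("\n")
--
--     prompt = prompt.lower()
--     keywords = prompt.replace("?", "").split()
--
--     scored = []
--
--     for line in lines:
--         score = 0
--         line_lower = line.lower()
--
--         for k in keywords:
--             if k in line_lower:
--                 score += 1
--
--         if score > 0:
--             scored.append((score, line))
--
--     # Sort by relevance score
--     scored.sort(reverse=True, key=lambda x: x[0])
--
--     top_lines = [line for score, line in scored[:25]]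
--
--     return "\n".join(top_lines)
-- ===== SOURCE B (Python) =====
-- def search_relevant_rows(prompt, csv_text):
--     lines = csv_text.split("\n")
--     keywords = prompt.lower().replace("?", "").split()
--     # score each line once
--     scores = [sum(1 for k in keywords if k in line.lower()) for line in lines]
--     # selection by descending score: one pass per possible score, stable in line order
--     result = []
--     for s in range(len(keywords), 0, -1):
--         result.extend(line for line, sc in zip(lines, scores) if sc == s)
--     return "\n".join(result[:25])
-- ===== Notes on version B (the rewrite author's own statement) =====
-- stated objective: alternative
-- what changed: Replaces the build-score-pairs-then-stable-sort pipeline by sort-free selection: score every line once, then walk the possible scores from highest to lowest collecting matching lines in original order, which reproduces the stable descending order without any sort.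
import Mathlib
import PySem

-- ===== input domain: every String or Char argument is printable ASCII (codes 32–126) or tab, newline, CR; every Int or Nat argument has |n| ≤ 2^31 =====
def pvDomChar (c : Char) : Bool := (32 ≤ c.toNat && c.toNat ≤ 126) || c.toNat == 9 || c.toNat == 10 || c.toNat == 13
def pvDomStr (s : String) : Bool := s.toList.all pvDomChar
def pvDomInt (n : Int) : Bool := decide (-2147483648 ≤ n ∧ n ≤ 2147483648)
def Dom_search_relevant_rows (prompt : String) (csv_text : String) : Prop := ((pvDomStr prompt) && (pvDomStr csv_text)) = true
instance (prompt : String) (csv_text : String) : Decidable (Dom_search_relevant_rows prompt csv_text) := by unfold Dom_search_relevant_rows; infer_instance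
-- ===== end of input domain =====

-- B replaces the sort of score/line pairs by score-descending selection passes; same return value, no speed claim.
-- ===== PORT A =====
def search_relevant_rows (prompt : String) (csv_text : String) : String :=
  let lines := (PySem.Str.split? csv_text "\n").getD []
  let prompt2 := PySem.Str.lower prompt
  let keywords := PySem.Str.split₀ (PySem.Str.replace prompt2 "?" "")
  let scored : List (Int × String) := lines.foldl (fun acc line =>
      let line_lower := PySem.Str.lower line
      let score := keywords.foldl (fun sc k => if PySem.Str.isIn k line_lower then sc + 1 else sc) (0 : Int)
      if score > 0 then acc ++ [(score, line)] else acc) []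
  let sortedScored := PySem.List.sorted scored (fun x => x.1) true
  let top_lines := (PySem.List.slice sortedScored none (some 25)).map (fun p => p.2)
  PySem.Str.join "\n" top_lines

-- ===== PORT B =====
def search_relevant_rows_alt (prompt : String) (csv_text : String) : String :=
  let lines := (PySem.Str.split? csv_text "\n").getD []
  let keywords := PySem.Str.split₀ (PySem.Str.replace (PySem.Str.lower prompt) "?" "")
  let scores : List Nat := lines.map (fun line => keywords.countP (fun k => PySem.Str.isIn k (PySem.Str.lower line)))
  let result : List String := (PySem.List.pyRange keywords.length 0 (-1)).foldl
      (fun acc s => acc ++ ((lines.zip scores).filter (fun p => (p.2 : Int) == s)).map (fun p => p.1)) []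
  PySem.Str.join "\n" (PySem.List.slice result none (some 25))

-- ===== PRECONDITION & SPEC =====
def Spec_search_relevant_rows (prompt : String) (csv_text : String) (out : String) : Prop := out = search_relevant_rows_alt prompt csv_text
instance (prompt : String) (csv_text : String) (out : String) : Decidable (Spec_search_relevant_rows prompt csv_text out) := by unfold Spec_search_relevant_rows; infer_instance

-- ===== CLAIM (what is proved, stated in full; the proofs are below) =====
def Claim_equal_search_relevant_rows : Prop := ∀ (prompt : String) (csv_text : String), Dom_search_relevant_rows prompt csv_text → Spec_search_relevant_rows prompt csv_text (search_relevant_rows prompt csv_text)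

-- ===== LEMMAS AND PROOFS =====

-- score of a line under a keyword list
def pvScore (keywords : List String) (line : String) : Nat :=
  keywords.countP (fun k => PySem.Str.isIn k (PySem.Str.lower line))

theorem pvInsertBy_append (before : (Int × String) → (Int × String) → Bool)
    (x : Int × String) (ys zs : List (Int × String)) (h : ∀ y ∈ ys, before x y = false) :
    PySem.List.insertBy before x (ys ++ zs) = ys ++ PySem.List.insertBy before x zs := by
  induction ys with
  | nil => rfl
  | cons y ys ih =>
    simp only [List.cons_append, PySem.List.insertBy, h y (by simp)]
    simp only [Bool.false_eq_true, if_false, List.cons_inj_right]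
    exact ih (fun y hy => h y (by simp [hy]))

theorem pvInsertBy_front (before : (Int × String) → (Int × String) → Bool)
    (x : Int × String) (l : List (Int × String)) (h : ∀ y ∈ l, before x y = true) :
    PySem.List.insertBy before x l = x :: l := by
  cases l with
  | nil => rfl
  | cons y ys => simp [PySem.List.insertBy, h y (by simp)]

theorem pvMem_filter_key (items : List (Int × String)) (s : Int) (p : Int × String)
    (hp : p ∈ items.filter (fun q => q.1 == s)) : p.1 = s := by
  have := List.of_mem_filter hp
  simpa using this

-- inserting x into the bucket concatenation appends x to its bucket
theorem pvIns (desc : List Int) (items : List (Int × String)) (x : Int × String)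
    (hpw : desc.Pairwise (· > ·)) (hx : x.1 ∈ desc) :
    PySem.List.insertBy (fun a b => decide (b.1 < a.1)) x
      (desc.flatMap (fun s => items.filter (fun p => p.1 == s)))
    = desc.flatMap (fun s => (items ++ [x]).filter (fun p => p.1 == s)) := by
  induction desc with
  | nil => simp at hx
  | cons s rest ih =>
    have hrest : ∀ t ∈ rest, t < s := by
      intro t ht; exact List.rel_of_pairwise_cons hpw ht
    simp only [List.flatMap_cons]
    by_cases hxs : x.1 = s
    · have hpass : ∀ y ∈ items.filter (fun p => p.1 == s),
          (fun (a b : Int × String) => decide (b.1 < a.1)) x y = false := by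
        intro y hy
        have hyk := pvMem_filter_key items s y hy
        simp [hyk, hxs]
      have hfront : ∀ y ∈ rest.flatMap (fun t => items.filter (fun p => p.1 == t)),
          (fun (a b : Int × String) => decide (b.1 < a.1)) x y = true := by
        intro y hy
        simp only [List.mem_flatMap] at hy
        obtain ⟨t, ht, hyt⟩ := hy
        have hyk := pvMem_filter_key items t y hyt
        simp only [hyk, hxs, decide_eq_true_eq]
        exact hrest t ht
      rw [pvInsertBy_append _ _ _ _ hpass, pvInsertBy_front _ _ _ hfront]
      have h1 : (items ++ [x]).filter (fun p => p.1 == s) = items.filter (fun p => p.1 == s) ++ [x] := by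
        simp [List.filter_append, hxs]
      have h2 : rest.flatMap (fun t => (items ++ [x]).filter (fun p => p.1 == t))
          = rest.flatMap (fun t => items.filter (fun p => p.1 == t)) := by
        apply List.flatMap_congr
        intro t ht
        have hts : x.1 ≠ t := by
          have := hrest t ht
          omega
        simp [List.filter_append, hts]
      rw [h1, h2]
      simp
    · have hxrest : x.1 ∈ rest := by
        rcases List.mem_cons.mp hx with h | h
        · exact absurd h hxs
        · exact h
      have hxlt : x.1 < s := hrest _ hxrest
      have hpass : ∀ y ∈ items.filter (fun p => p.1 == s),
          (fun (a b : Int × String) => decide (b.1 < a.1)) x y = false := by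
        intro y hy
        have hyk := pvMem_filter_key items s y hy
        simp only [hyk, decide_eq_false_iff_not, not_lt]
        omega
      rw [pvInsertBy_append _ _ _ _ hpass]
      rw [ih (List.Pairwise.of_cons hpw) hxrest]
      have h1 : (items ++ [x]).filter (fun p => p.1 == s) = items.filter (fun p => p.1 == s) := by
        simp [List.filter_append]
        omega
      rw [h1]

-- the stable reverse sort by score is the bucket concatenation
theorem pvSortEq (desc : List Int) (items : List (Int × String))
    (hpw : desc.Pairwise (· > ·)) (hkeys : ∀ p ∈ items, p.1 ∈ desc) :
    PySem.List.sorted items (fun x => x.1) true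
      = desc.flatMap (fun s => items.filter (fun p => p.1 == s)) := by
  rw [PySem.List.sorted_rev_eq_foldl_insertBy]
  induction items using List.reverseRecOn with
  | nil => simp
  | append_singleton items x ih =>
    rw [List.foldl_append, List.foldl_cons, List.foldl_nil]
    rw [ih (fun p hp => hkeys p (by simp [hp]))]
    exact pvIns desc items x hpw (hkeys x (by simp))

theorem pvMem_desc (K : Nat) (v : Int) :
    v ∈ PySem.List.pyRange (K : Int) 0 (-1) ↔ 1 ≤ v ∧ v ≤ (K : Int) := by
  rw [PySem.List.pyRange_neg_one]
  simp only [List.mem_map, List.mem_range]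
  constructor
  · rintro ⟨k, hk, rfl⟩
    omega
  · intro h
    exact ⟨((K : Int) - v).toNat, by omega, by omega⟩

theorem pvDesc_pairwise (K : Nat) :
    (PySem.List.pyRange (K : Int) 0 (-1)).Pairwise (· > ·) := by
  rw [PySem.List.pyRange_neg_one]
  apply List.Pairwise.map
  · intro a b hab
    exact hab
  · exact List.pairwise_lt_range.imp (by intro a b h; omega)

-- A's scored-building loop, characterised
theorem pvScored_eq (keywords lines : List String) (acc : List (Int × String)) :
    lines.foldl (fun acc line =>
      let line_lower := PySem.Str.lower line
      let score := keywords.foldl (fun sc k => if PySem.Str.isIn k line_lower then sc + 1 else sc) (0 : Int)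
      if score > 0 then acc ++ [(score, line)] else acc) acc
    = acc ++ (lines.filter (fun l => 0 < pvScore keywords l)).map
        (fun l => ((pvScore keywords l : Int), l)) := by
  induction lines generalizing acc with
  | nil => simp
  | cons line rest ih =>
    rw [List.foldl_cons, ih]
    have hin : keywords.foldl (fun sc k => if PySem.Str.isIn k (PySem.Str.lower line) then sc + 1 else sc) (0 : Int)
        = (pvScore keywords line : Int) := by
      rw [PySem.List.foldl_if_add_one]
      simp [pvScore]
    simp only [hin]
    by_cases h : 0 < pvScore keywords line
    · have : ((pvScore keywords line : Int)) > 0 := by exact_mod_cast h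
      rw [List.filter_cons_of_pos (by simpa using h), if_pos this]
      simp
    · have : ¬ ((pvScore keywords line : Int)) > 0 := by exact_mod_cast h
      rw [List.filter_cons_of_neg (by simpa using h), if_neg this]

set_option maxHeartbeats 2000000 in
theorem search_relevant_rows_eq (prompt csv_text : String) :
    search_relevant_rows prompt csv_text = search_relevant_rows_alt prompt csv_text := by
  unfold search_relevant_rows search_relevant_rows_alt
  simp only []
  set lines := (PySem.Str.split? csv_text "\n").getD [] with hlines
  set keywords := PySem.Str.split₀ (PySem.Str.replace (PySem.Str.lower prompt) "?" "") with hkw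
  set K := keywords.length with hK
  set desc := PySem.List.pyRange (K : Int) 0 (-1) with hdesc
  -- A's scored list
  rw [pvScored_eq]
  set lsF := lines.filter (fun l => 0 < pvScore keywords l) with hlsF
  set scored := lsF.map (fun l => ((pvScore keywords l : Int), l)) with hscored
  -- sort = buckets
  have hkeys : ∀ p ∈ scored, p.1 ∈ desc := by
    intro p hp
    rw [hscored] at hp
    simp only [List.mem_map] at hp
    obtain ⟨l, hl, rfl⟩ := hp
    rw [hdesc, pvMem_desc]
    have h1 : 0 < pvScore keywords l := by
      rw [hlsF] at hl
      have := (List.mem_filter.mp hl).2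
      simpa using this
    have h2 : pvScore keywords l ≤ K := List.countP_le_length
    omega
  simp only [List.nil_append]
  rw [pvSortEq desc scored (pvDesc_pairwise K) hkeys]
  -- B's loop = flatMap
  rw [PySem.List.foldl_append_eq_flatMap]
  simp only [List.nil_append]
  -- B's zip of lines with their scores
  have hzip : lines.zip (lines.map (fun line => keywords.countP (fun k => PySem.Str.isIn k (PySem.Str.lower line))))
      = lines.map (fun l => (l, pvScore keywords l)) := by
    have := List.zip_map' (f := fun l : String => l)
      (g := fun line => keywords.countP (fun k => PySem.Str.isIn k (PySem.Str.lower line))) (l := lines)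
    simpa [pvScore] using this
  rw [hzip]
  -- both slices are take 25
  have htake : ∀ (xs : List String) (ys : List (Int × String)),
      PySem.List.slice xs none (some 25) = xs.take 25 ∧
      PySem.List.slice ys none (some 25) = ys.take 25 :=
    fun xs ys => ⟨by simp [pysem], by simp [pysem]⟩
  rw [(htake [] _).2, (htake _ []).1]
  apply congrArg
  rw [List.map_take]
  apply congrArg
  -- per-bucket equality
  rw [List.map_flatMap]
  apply List.flatMap_congr
  intro s hs
  have hs1 : 1 ≤ s := ((pvMem_desc K s).mp (hdesc ▸ hs)).1
  -- A side bucket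
  rw [hscored, List.filter_map, List.map_map]
  rw [List.filter_map, List.map_map]
  simp only [Function.comp_def, List.map_id']
  rw [hlsF, List.filter_filter]
  apply List.filter_congr
  intro l _
  by_cases h : (pvScore keywords l : Int) = s
  · have hb : ((pvScore keywords l : Int) == s) = true := by
      simp only [beq_iff_eq]; exact h
    have hd : (decide (0 < pvScore keywords l)) = true := by
      simp only [decide_eq_true_eq]; omega
    rw [hb, hd, Bool.true_and]
  · have hb : ((pvScore keywords l : Int) == s) = false := by
      simp only [beq_eq_false_iff_ne, ne_eq]; exact h
    rw [hb, Bool.false_and]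

-- ===== VERDICT (by name: the statement is the Claim_ definition above) =====
theorem search_relevant_rows_spec : Claim_equal_search_relevant_rows := by
  intro prompt csv_text _
  unfold Spec_search_relevant_rows
  exact search_relevant_rows_eq prompt csv_text
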